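-- pv_equiv track=rewrite | github.com/MrBrantCode/unitest_baseline | mut_generate/mist_train_taco/taco_2592/solution.py | calculate_fibonacci_modified_average
-- ===== SOURCE A (Python) =====
-- def calculate_fibonacci_modified_average(N, arr):
--     # Initialize the first two Fibonacci numbers
--     fib = [0, 1]
--     sum_modified = 0
--
--     # Iterate through the array
--     for j in range(N):
--         # Check if the current index (1-based) is a Fibonacci number
--         if j + 1 == fib[0] + fib[1]:
--             # Multiply the element by its index
--             v = arr[j] * (j + 1)
--             # If the result is greater than 100, reduce it to the last two digits
--             if v > 100:
--                 v %= 100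
--             # Update the array element
--             arr[j] = v
--             # Update the Fibonacci sequence
--             (fib[0], fib[1]) = (fib[1], j + 1)
--
--         # Accumulate the sum of the modified array elements
--         sum_modified += arr[j]
--
--     # Calculate the floor value of the average
--     return sum_modified // N
-- ===== SOURCE B (Python) =====
-- def calculate_fibonacci_modified_average(N, arr):
--     # Sparse pass: touch only the Fibonacci positions 1,2,3,5,8,... (1-based), then average.
--     p, q = 1, 2
--     while p <= N:
--         v = arr[p - 1] * p
--         if v > 100:
--             v %= 100
--         arr[p - 1] = v
--         p, q = q, p + q
--     return sum(arr[j] for j in range(N)) // N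
-- ===== Notes on version B (the rewrite author's own statement) =====
-- stated objective: simpler
-- what changed: B replaces A's full scan that tests every index against the running Fibonacci pair by a sparse while-loop over the Fibonacci positions 1,2,3,5,8,... <= N only, followed by a plain sum of the first N elements.
import Mathlib
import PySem

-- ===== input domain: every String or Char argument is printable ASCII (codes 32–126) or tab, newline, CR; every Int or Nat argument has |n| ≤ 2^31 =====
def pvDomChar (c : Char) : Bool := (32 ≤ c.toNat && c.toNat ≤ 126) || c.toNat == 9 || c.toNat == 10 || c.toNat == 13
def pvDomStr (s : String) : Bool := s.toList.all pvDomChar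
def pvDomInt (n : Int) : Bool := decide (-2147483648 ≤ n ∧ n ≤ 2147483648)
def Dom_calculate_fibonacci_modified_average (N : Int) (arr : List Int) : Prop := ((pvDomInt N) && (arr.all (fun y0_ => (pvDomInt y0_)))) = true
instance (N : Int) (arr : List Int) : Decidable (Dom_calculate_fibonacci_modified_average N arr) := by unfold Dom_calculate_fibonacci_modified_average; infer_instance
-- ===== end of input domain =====

-- B replaces A's full scan (fib-test on every index) by a sparse loop over the Fibonacci
-- positions only, then a plain sum — simpler decomposition; same in-place mutation of arr
-- as A (the theorems are about the return value).

-- ===== PORT A =====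
-- state = (fib[0], fib[1], sum_modified, arr)
def fibStepA (st : Int × Int × Int × List Int) (j : Int) : Int × Int × Int × List Int :=
  match st with
  | (f0, f1, sm, a) =>
    if j + 1 = f0 + f1 then
      let v := PySem.List.pyGetD a j 0 * (j + 1)
      let v := if v > 100 then PySem.Int.mod v 100 else v
      (f1, j + 1, sm + v, PySem.List.pySetD a j v)
    else
      (f0, f1, sm + PySem.List.pyGetD a j 0, a)

def calculate_fibonacci_modified_average (N : Int) (arr : List Int) : Int :=
  let st := (PySem.List.pyRange 0 N 1).foldl fibStepA (0, 1, 0, arr)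
  PySem.Int.floordiv st.2.2.1 N

-- ===== PORT B =====
-- the Fibonacci positions 1, 2, 3, 5, 8, … that are ≤ N (B's while loop)
def fibPositions (N p q : Int) (hp : 1 ≤ p) (hpq : p < q) : List Int :=
  if h : p ≤ N then
    p :: fibPositions N q (p + q) (by omega) (by omega)
  else []
termination_by (N + 1 - p).toNat
decreasing_by omega

-- body of B's while loop: v = arr[p-1]*p; if v > 100: v %= 100; arr[p-1] = v
def fibMutStep (a : List Int) (p : Int) : List Int :=
  let v := PySem.List.pyGetD a (p - 1) 0 * p
  let v := if v > 100 then PySem.Int.mod v 100 else v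
  PySem.List.pySetD a (p - 1) v

def calculate_fibonacci_modified_average_alt (N : Int) (arr : List Int) : Int :=
  let a := (fibPositions N 1 2 (by omega) (by omega)).foldl fibMutStep arr
  let s := (PySem.List.pyRange 0 N 1).foldl (fun s j => s + PySem.List.pyGetD a j 0) 0
  PySem.Int.floordiv s N

-- ===== PRECONDITION & SPEC =====
-- Pre_ excludes exactly where the Python A raises: N = 0 (ZeroDivisionError) and
-- 0 < N > len(arr) (IndexError at arr[j]).  For N < 0 the loop body never runs and
-- A returns 0 // N = 0; that is inside Pre_.
def Pre_calculate_fibonacci_modified_average (N : Int) (arr : List Int) : Prop :=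
  N ≠ 0 ∧ N ≤ (arr.length : Int)
instance (N : Int) (arr : List Int) : Decidable (Pre_calculate_fibonacci_modified_average N arr) := by
  unfold Pre_calculate_fibonacci_modified_average; infer_instance

def pvWitness_calculate_fibonacci_modified_average : Int × List Int := (3, [7, 8, 9])

def Spec_calculate_fibonacci_modified_average (N : Int) (arr : List Int) (out : Int) : Prop := out = calculate_fibonacci_modified_average_alt N arr
instance (N : Int) (arr : List Int) (out : Int) : Decidable (Spec_calculate_fibonacci_modified_average N arr out) := by unfold Spec_calculate_fibonacci_modified_average; infer_instance

-- ===== CLAIM (what is proved, stated in full; the proofs are below) =====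
def Claim_equal_calculate_fibonacci_modified_average : Prop := ∀ (N : Int) (arr : List Int), Dom_calculate_fibonacci_modified_average N arr → Pre_calculate_fibonacci_modified_average N arr → Spec_calculate_fibonacci_modified_average N arr (calculate_fibonacci_modified_average N arr)

-- ===== LEMMAS AND PROOFS =====

lemma fibPositions_congr (N p q p' q' : Int) (hp : 1 ≤ p) (hpq : p < q)
    (hp' : 1 ≤ p') (hpq' : p' < q') (h1 : p = p') (h2 : q = q') :
    fibPositions N p q hp hpq = fibPositions N p' q' hp' hpq' := by
  subst h1; subst h2; rfl

lemma fibPositions_eq_nil (N p q : Int) (hp : 1 ≤ p) (hpq : p < q) (h : N < p) :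
    fibPositions N p q hp hpq = [] := by
  rw [fibPositions, dif_neg (by omega : ¬ p ≤ N)]

lemma fibPositions_cons (N p q : Int) (hp : 1 ≤ p) (hpq : p < q) (h : p ≤ N) :
    fibPositions N p q hp hpq = p :: fibPositions N q (p + q) (by omega) (by omega) := by
  rw [fibPositions, dif_pos h]

-- every emitted position lies in [p, N]
lemma fibPositions_mem_bounds : ∀ (n : Nat) (N p q : Int) (hp : 1 ≤ p) (hpq : p < q),
    n = (N + 1 - p).toNat → ∀ x ∈ fibPositions N p q hp hpq, p ≤ x ∧ x ≤ N := by
  intro n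
  induction n using Nat.strong_induction_on with
  | _ n ih =>
    intro N p q hp hpq hn x hx
    by_cases h : p ≤ N
    · rw [fibPositions_cons N p q hp hpq h] at hx
      rcases List.mem_cons.mp hx with rfl | hx
      · exact ⟨le_refl _, h⟩
      · have := ih (N + 1 - q).toNat (by omega) N q (p + q) (by omega) (by omega) rfl x hx
        omega
    · rw [fibPositions_eq_nil N p q hp hpq (by omega)] at hx
      simp at hx

-- mutations at positions > j + 1 do not touch index j
lemma length_fibMutStep (a : List Int) (p : Int) : (fibMutStep a p).length = a.length := by
  unfold fibMutStep; simp

lemma getD_foldl_fibMutStep_low (P : List Int) (a : List Int) (j : Int)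
    (hj : 0 ≤ j) (hlen : j < (a.length : Int)) (hP : ∀ x ∈ P, j + 1 < x) :
    PySem.List.pyGetD (P.foldl fibMutStep a) j 0 = PySem.List.pyGetD a j 0 := by
  induction P generalizing a with
  | nil => rfl
  | cons p P ih =>
    have hp := hP p (by simp)
    rw [List.foldl_cons,
      ih _ (by rw [length_fibMutStep]; exact hlen) (fun x hx => hP x (by simp [hx]))]
    unfold fibMutStep
    rw [PySem.List.pySetD_of_nonneg _ _ (by omega)]
    rw [PySem.List.pyGetD_eq_getElem _ _ hj (by rw [List.length_set]; exact hlen),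
      PySem.List.pyGetD_eq_getElem _ _ hj hlen]
    exact List.getElem_set_ne (by omega) _

-- the value stored at a just-mutated index survives the later (larger-index) mutations
lemma getD_foldl_fibMutStep_set (P : List Int) (a : List Int) (j v : Int)
    (hj : 0 ≤ j) (hlen : j < (a.length : Int)) (hP : ∀ x ∈ P, j + 1 < x) :
    PySem.List.pyGetD (P.foldl fibMutStep (PySem.List.pySetD a j v)) j 0 = v := by
  rw [getD_foldl_fibMutStep_low P _ j hj (by rw [PySem.List.length_pySetD]; exact hlen) hP,
    PySem.List.pySetD_of_nonneg _ _ hj,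
    PySem.List.pyGetD_eq_getElem _ _ hj (by rw [List.length_set]; exact hlen)]
  exact List.getElem_set_self _

-- main invariant: A's running sum from index k equals B's sum of the fully mutated
-- array over [k, N), given that the next Fibonacci match is f0 + f1 ≥ k + 1
lemma mainA (N : Int) : ∀ (n : Nat) (k f0 f1 sm : Int) (a : List Int)
    (hn : n = (N - k).toNat) (hk : 0 ≤ k) (hf0 : 0 ≤ f0) (hf1 : 1 ≤ f1)
    (hnext : k + 1 ≤ f0 + f1) (hlen : N ≤ (a.length : Int)),
    ((PySem.List.pyRange k N 1).foldl fibStepA (f0, f1, sm, a)).2.2.1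
      = sm + ((PySem.List.pyRange k N 1).map
          (fun j => PySem.List.pyGetD
            ((fibPositions N (f0 + f1) (f0 + 2 * f1) (by omega) (by omega)).foldl fibMutStep a) j 0)).sum := by
  intro n
  induction n with
  | zero =>
    intro k f0 f1 sm a hn hk hf0 hf1 hnext hlen
    rw [PySem.List.pyRange_one_eq_nil (by omega : N ≤ k)]
    simp
  | succ n ih =>
    intro k f0 f1 sm a hn hk hf0 hf1 hnext hlen
    have hkN : k < N := by omega
    rw [PySem.List.pyRange_one_cons hkN]
    by_cases hmatch : k + 1 = f0 + f1
    · -- Fibonacci match at 1-based index k+1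
      have hfib : fibPositions N (f0 + f1) (f0 + 2 * f1) (by omega) (by omega)
          = (f0 + f1) :: fibPositions N (f0 + 2 * f1) (2 * f0 + 3 * f1) (by omega) (by omega) := by
        rw [fibPositions_cons N _ _ _ _ (by omega)]
        exact congrArg _ (fibPositions_congr _ _ _ _ _ _ _ (by omega) (by omega) rfl (by ring))
      set v0 := PySem.List.pyGetD a k 0 * (k + 1) with hv0
      set v := if v0 > 100 then PySem.Int.mod v0 100 else v0 with hv
      have hstep : fibStepA (f0, f1, sm, a) k = (f1, k + 1, sm + v, PySem.List.pySetD a k v) := by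
        simp only [fibStepA, if_pos hmatch, hv, hv0]
      have hmut : fibMutStep a (f0 + f1) = PySem.List.pySetD a k v := by
        unfold fibMutStep
        have h1 : f0 + f1 - 1 = k := by omega
        rw [h1, ← hmatch]
      rw [List.foldl_cons, hstep,
        ih (k + 1) f1 (k + 1) (sm + v) (PySem.List.pySetD a k v) (by omega) (by omega)
          (by omega) (by omega) (by omega)
          (by rw [PySem.List.length_pySetD]; exact hlen)]
      have hfib2 : fibPositions N (f1 + (k + 1)) (f1 + 2 * (k + 1)) (by omega) (by omega)
          = fibPositions N (f0 + 2 * f1) (2 * f0 + 3 * f1) (by omega) (by omega) :=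
        fibPositions_congr _ _ _ _ _ _ _ _ _ (by omega) (by omega)
      rw [hfib2, hfib, List.map_cons, List.sum_cons, List.foldl_cons, hmut]
      have hget : PySem.List.pyGetD
          ((fibPositions N (f0 + 2 * f1) (2 * f0 + 3 * f1) (by omega) (by omega)).foldl
            fibMutStep (PySem.List.pySetD a k v)) k 0 = v := by
        apply getD_foldl_fibMutStep_set _ _ _ _ hk (by omega)
        intro x hx
        have := fibPositions_mem_bounds (N + 1 - (f0 + 2 * f1)).toNat N _ _ (by omega) (by omega) rfl x hx
        omega
      rw [hget]; ring
    · -- no match: the element is untouched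
      have hstep : fibStepA (f0, f1, sm, a) k = (f0, f1, sm + PySem.List.pyGetD a k 0, a) := by
        simp only [fibStepA, if_neg hmatch]
      rw [List.foldl_cons, hstep,
        ih (k + 1) f0 f1 (sm + PySem.List.pyGetD a k 0) a (by omega) (by omega)
          hf0 hf1 (by omega) hlen]
      rw [List.map_cons, List.sum_cons]
      have hget : PySem.List.pyGetD
          ((fibPositions N (f0 + f1) (f0 + 2 * f1) (by omega) (by omega)).foldl
            fibMutStep a) k 0 = PySem.List.pyGetD a k 0 := by
        apply getD_foldl_fibMutStep_low _ _ _ hk (by omega)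
        intro x hx
        have := fibPositions_mem_bounds (N + 1 - (f0 + f1)).toNat N _ _ (by omega) (by omega) rfl x hx
        omega
      rw [hget]; ring

-- ===== VERDICT (by name: the statement is the Claim_ definition above) =====
theorem calculate_fibonacci_modified_average_spec : Claim_equal_calculate_fibonacci_modified_average := by
  intro N arr _ hpre
  obtain ⟨hN0, hNlen⟩ := hpre
  unfold Spec_calculate_fibonacci_modified_average
  unfold calculate_fibonacci_modified_average calculate_fibonacci_modified_average_alt
  by_cases hNpos : 1 ≤ N
  · have h12 : fibPositions N (0 + 1) (0 + 2 * 1) (by omega) (by omega)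
        = fibPositions N 1 2 (by omega) (by omega) :=
      fibPositions_congr _ _ _ _ _ _ _ _ _ (by omega) (by omega)
    have hmain := mainA N N.toNat 0 0 1 0 arr (by omega) (by omega) (by omega) (by omega)
      (by omega) hNlen
    rw [h12] at hmain
    simp only [hmain, PySem.List.foldl_add, zero_add]
  · -- N < 0: both loops are empty and both sides are 0 // N
    rw [PySem.List.pyRange_one_eq_nil (by omega),
      fibPositions_eq_nil N 1 2 (by omega) (by omega) (by omega)]
    simp
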